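-- pv_equiv track=rewrite | github.com/DaniloRibeiro07/UFS | PI/Questionário 11/Willy Ecológico.py | verificar_madeira_conseguida
-- ===== SOURCE A (Python) =====
-- def verificar_madeira_conseguida(quantidade_arvores,arvores,madeira_necessaria):
--     lista_madeira_conseguida=list()
--     for i in range(quantidade_arvores):
--         madeira_conseguida=0
--         for n in range(i+1,quantidade_arvores):
--             madeira_conseguida+=arvores[n]-arvores[i]
--         lista_madeira_conseguida.append(madeira_conseguida)
--
--     for i in range(quantidade_arvores-1,-1,-1):
--         if lista_madeira_conseguida[i]>=madeira_necessaria: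
--             return i
-- ===== SOURCE B (Python) =====
-- def verificar_madeira_conseguida(quantidade_arvores, arvores, madeira_necessaria):
--     # One backward pass: maintain suffix sum and count so that the wood obtained
--     # at index i is suffix - count*arvores[i]; return the first (largest) index
--     # meeting the requirement.
--     suffix = 0
--     count = 0
--     for i in range(quantidade_arvores - 1, -1, -1):
--         if suffix - count * arvores[i] >= madeira_necessaria:
--             return i
--         suffix += arvores[i]
--         count += 1
--     return None
-- ===== Notes on version B (the rewrite author's own statement) =====
-- stated objective: faster
-- what changed: Replaces the O(n^2) per-index inner summation plus a second backward scan by a single backward pass maintaining a running suffix sum and count, returning as soon as suffix - count*arvores[i] meets the requirement.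
-- outside the precondition, e.g. on verificar_madeira_conseguida(1, [], 0): A returns 0, B raises IndexError
import Mathlib
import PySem

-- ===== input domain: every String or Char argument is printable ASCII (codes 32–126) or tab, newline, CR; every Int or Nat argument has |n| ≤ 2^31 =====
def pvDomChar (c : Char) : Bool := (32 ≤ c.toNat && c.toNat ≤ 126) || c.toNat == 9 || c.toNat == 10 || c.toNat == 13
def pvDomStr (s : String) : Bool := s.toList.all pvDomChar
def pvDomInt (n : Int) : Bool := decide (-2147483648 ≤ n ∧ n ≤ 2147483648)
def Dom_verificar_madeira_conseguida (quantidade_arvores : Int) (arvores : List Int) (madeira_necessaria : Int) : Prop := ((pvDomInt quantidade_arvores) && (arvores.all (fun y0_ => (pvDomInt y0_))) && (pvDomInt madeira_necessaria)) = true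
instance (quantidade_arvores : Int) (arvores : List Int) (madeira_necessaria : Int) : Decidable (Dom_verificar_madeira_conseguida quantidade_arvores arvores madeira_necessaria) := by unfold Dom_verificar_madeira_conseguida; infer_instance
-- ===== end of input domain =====

-- B replaces A's O(n^2) per-index inner summation plus a second backward scan by a
-- single backward pass with a running suffix sum and count (objective: faster, asymptotic).

-- ===== PORT A =====
-- inner loop of A: madeira_conseguida for index i
def pvInner (arvores : List Int) (q i : Int) : Int :=
  (PySem.List.pyRange (i+1) q 1).foldl
    (fun m n => m + (PySem.List.pyGetD arvores n 0 - PySem.List.pyGetD arvores i 0)) 0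

-- second loop of A: first i (scanning the given index list) whose stored value meets the need
def pvOuterA (need : Int) (lista : List Int) (L : List Int) : Option Int :=
  L.foldl (fun res i =>
    match res with
    | some r => some r
    | none => if PySem.List.pyGetD lista i 0 ≥ need then some i else none) none

def verificar_madeira_conseguida (quantidade_arvores : Int) (arvores : List Int) (madeira_necessaria : Int) : Option Int :=
  let lista := (PySem.List.pyRange 0 quantidade_arvores 1).foldl
      (fun acc i => acc ++ [pvInner arvores quantidade_arvores i]) []
  pvOuterA madeira_necessaria lista (PySem.List.pyRange (quantidade_arvores - 1) (-1) (-1))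

-- ===== PORT B =====
-- B's backward loop with early return, as structural recursion on the index list
def pvAltLoop (arvores : List Int) (need : Int) : List Int → Int → Int → Option Int
  | [], _, _ => none
  | i :: rest, suffix, count =>
    let ai := PySem.List.pyGetD arvores i 0
    if suffix - count * ai ≥ need then some i
    else pvAltLoop arvores need rest (suffix + ai) (count + 1)

def verificar_madeira_conseguida_alt (quantidade_arvores : Int) (arvores : List Int) (madeira_necessaria : Int) : Option Int :=
  pvAltLoop arvores madeira_necessaria (PySem.List.pyRange (quantidade_arvores - 1) (-1) (-1)) 0 0

-- ===== PRECONDITION & SPEC =====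
-- Pre_ excludes the inputs with quantidade_arvores greater than the list length: there B
-- raises IndexError (it reads arvores[i] at every index), and A either raises IndexError too
-- or, when quantidade_arvores = 1 on an empty list, returns a value only because its inner
-- ranges are empty and it never indexes the list at all.
def Pre_verificar_madeira_conseguida (quantidade_arvores : Int) (arvores : List Int) (madeira_necessaria : Int) : Prop :=
  quantidade_arvores ≤ (arvores.length : Int)
instance (quantidade_arvores : Int) (arvores : List Int) (madeira_necessaria : Int) : Decidable (Pre_verificar_madeira_conseguida quantidade_arvores arvores madeira_necessaria) := by unfold Pre_verificar_madeira_conseguida; infer_instance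

def pvWitness_verificar_madeira_conseguida : Int × List Int × Int := (3, [1, 2, 5], 4)

def Spec_verificar_madeira_conseguida (quantidade_arvores : Int) (arvores : List Int) (madeira_necessaria : Int) (out : Option Int) : Prop := out = verificar_madeira_conseguida_alt quantidade_arvores arvores madeira_necessaria
instance (quantidade_arvores : Int) (arvores : List Int) (madeira_necessaria : Int) (out : Option Int) : Decidable (Spec_verificar_madeira_conseguida quantidade_arvores arvores madeira_necessaria out) := by unfold Spec_verificar_madeira_conseguida; infer_instance

-- ===== CLAIM (what is proved, stated in full; the proofs are below) =====
def Claim_equal_verificar_madeira_conseguida : Prop := ∀ (quantidade_arvores : Int) (arvores : List Int) (madeira_necessaria : Int), Dom_verificar_madeira_conseguida quantidade_arvores arvores madeira_necessaria → Pre_verificar_madeira_conseguida quantidade_arvores arvores madeira_necessaria → Spec_verificar_madeira_conseguida quantidade_arvores arvores madeira_necessaria (verificar_madeira_conseguida quantidade_arvores arvores madeira_necessaria)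

-- ===== LEMMAS AND PROOFS =====

-- suffix sum of arvores values from index k (as Nat) up to q-1
def pvSuf (arvores : List Int) (q : Int) (k : Int) : Int :=
  ((PySem.List.pyRange k q 1).map (fun n => PySem.List.pyGetD arvores n 0)).sum

theorem pvOuterA_some (need : Int) (lista : List Int) (L : List Int) (r : Int) :
    L.foldl (fun res i =>
      match res with
      | some r => some r
      | none => if PySem.List.pyGetD lista i 0 ≥ need then some i else none) (some r) = some r := by
  induction L with
  | nil => rfl
  | cons i L ih => simpa [List.foldl] using ih

theorem pvOuterA_cons (need : Int) (lista : List Int) (i : Int) (L : List Int) :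
    pvOuterA need lista (i :: L) =
      if PySem.List.pyGetD lista i 0 ≥ need then some i else pvOuterA need lista L := by
  unfold pvOuterA
  by_cases h : PySem.List.pyGetD lista i 0 ≥ need
  · simp [List.foldl, h, pvOuterA_some]
  · simp [List.foldl, h]

theorem pv_affine_fold (g : Int → Int) (c : Int) (L : List Int) (init : Int) :
    L.foldl (fun m n => m + (g n - c)) init
      = init + (L.map g).sum - (L.length : Int) * c := by
  induction L generalizing init with
  | nil => simp
  | cons n L ih => simp [List.foldl, ih]; ring

theorem pvInner_eq (arvores : List Int) (q i : Int) (hi : i < q) :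
    pvInner arvores q i = pvSuf arvores q (i+1) - (q - i - 1) * PySem.List.pyGetD arvores i 0 := by
  unfold pvInner pvSuf
  rw [pv_affine_fold]
  rw [PySem.List.length_pyRange_one]
  have : ((q - (i+1)).toNat : Int) = q - i - 1 := by omega
  rw [this]; ring

theorem pvSuf_cons (arvores : List Int) (q k : Int) (hk : k < q) :
    pvSuf arvores q k = PySem.List.pyGetD arvores k 0 + pvSuf arvores q (k+1) := by
  unfold pvSuf
  rw [PySem.List.pyRange_one_cons hk]
  simp

theorem pvSuf_nil (arvores : List Int) (q : Int) : pvSuf arvores q q = 0 := by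
  unfold pvSuf
  rw [PySem.List.pyRange_one_eq_nil le_rfl]
  rfl

theorem pv_lista_eq (arvores : List Int) (q : Int) :
    (PySem.List.pyRange 0 q 1).foldl (fun acc i => acc ++ [pvInner arvores q i]) []
      = (PySem.List.pyRange 0 q 1).map (pvInner arvores q) := by
  simpa using PySem.List.foldl_append_singleton_eq_map (pvInner arvores q) (PySem.List.pyRange 0 q 1) []

theorem pv_main (arvores : List Int) (q need : Int) (k : Nat) (hk : (k : Int) ≤ q) :
    pvOuterA need ((PySem.List.pyRange 0 q 1).map (pvInner arvores q))
        (PySem.List.pyRange ((k : Int) - 1) (-1) (-1))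
      = pvAltLoop arvores need (PySem.List.pyRange ((k : Int) - 1) (-1) (-1))
          (pvSuf arvores q k) (q - k) := by
  induction k with
  | zero =>
    rw [PySem.List.pyRange_neg_one_eq_nil (by omega)]
    rfl
  | succ k ih =>
    have hkk : ((k : Int) + 1) - 1 = (k : Int) := by ring
    have hcons : PySem.List.pyRange (((k:Nat)+1 : Int) - 1) (-1) (-1)
        = (k : Int) :: PySem.List.pyRange ((k : Int) - 1) (-1) (-1) := by
      rw [hkk, PySem.List.pyRange_neg_one_cons (by omega)]
    push_cast
    push_cast at hcons
    rw [hcons, pvOuterA_cons]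
    have hklt : (k : Int) < q := by push_cast at hk; omega
    have hget : PySem.List.pyGetD ((PySem.List.pyRange 0 q 1).map (pvInner arvores q)) (k : Int) 0
        = pvInner arvores q (k : Int) := by
      exact PySem.List.pyGetD_map_pyRange_of_nonneg _ _ _ _ (by omega) hklt
    have hval : pvInner arvores q (k : Int)
        = pvSuf arvores q ((k : Int) + 1) - (q - ((k:Int)+1)) * PySem.List.pyGetD arvores (k : Int) 0 := by
      rw [pvInner_eq arvores q (k : Int) hklt]; ring_nf
    show _ = pvAltLoop arvores need ((k : Int) :: _) _ _
    rw [pvAltLoop]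
    simp only [hget, hval]
    by_cases hc : pvSuf arvores q ((k:Int)+1) - (q - ((k:Int)+1)) * PySem.List.pyGetD arvores (k:Int) 0 ≥ need
    · rw [if_pos hc, if_pos hc]
    · rw [if_neg hc, if_neg hc]
      have hsuf : pvSuf arvores q ((k:Int)+1) + PySem.List.pyGetD arvores (k:Int) 0 = pvSuf arvores q (k:Int) := by
        rw [pvSuf_cons arvores q (k:Int) hklt]; ring
      have hcnt : q - ((k:Int)+1) + 1 = q - (k:Int) := by ring
      rw [hsuf, hcnt]
      exact ih (by omega)

-- ===== VERDICT (by name: the statement is the Claim_ definition above) =====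
theorem verificar_madeira_conseguida_spec : Claim_equal_verificar_madeira_conseguida := by
  intro q arvores need _ _
  unfold Spec_verificar_madeira_conseguida verificar_madeira_conseguida verificar_madeira_conseguida_alt
  rw [pv_lista_eq]
  by_cases hq : q ≤ 0
  · rw [PySem.List.pyRange_neg_one_eq_nil (by omega)]
    rfl
  · have hq' : ((q.toNat : Int)) = q := by omega
    have := pv_main arvores q need q.toNat (by omega)
    rw [hq'] at this
    rw [this, pvSuf_nil]
    simp
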